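-- pv_equiv track=rewrite | github.com/w3f/jamtestvectors | shuffle/main.py | compute_shuffle_eq329
-- ===== SOURCE A (Python) =====
-- def compute_shuffle_eq329(s, r):
--     if len(s) > 0:
--         l = len(s)
--         index = r[0] % l
--         head = s[index]
--
--         s_post = s.copy()
--         s_post[index] = s[l-1]
--
--         return [head] + compute_shuffle_eq329(s_post[:-1], r[1:])
--     else:
--         return []
-- ===== SOURCE B (Python) =====
-- def compute_shuffle_eq329(s, r):
--     arr = list(s)
--     out = []
--     l = len(s)
--     for rv in r[:len(s)]:
--         idx = rv % l
--         out.append(arr[idx])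
--         arr[idx] = arr[l - 1]
--         l -= 1
--     return out
-- ===== Notes on version B (the rewrite author's own statement) =====
-- stated objective: faster
-- what changed: Replaced the recursion that copies and slices the list at every step with a single in-place iterative pass: pick arr[r[i] % l], overwrite that slot with arr[l-1], shrink l -- no per-step list copies or slices.
import Mathlib
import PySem

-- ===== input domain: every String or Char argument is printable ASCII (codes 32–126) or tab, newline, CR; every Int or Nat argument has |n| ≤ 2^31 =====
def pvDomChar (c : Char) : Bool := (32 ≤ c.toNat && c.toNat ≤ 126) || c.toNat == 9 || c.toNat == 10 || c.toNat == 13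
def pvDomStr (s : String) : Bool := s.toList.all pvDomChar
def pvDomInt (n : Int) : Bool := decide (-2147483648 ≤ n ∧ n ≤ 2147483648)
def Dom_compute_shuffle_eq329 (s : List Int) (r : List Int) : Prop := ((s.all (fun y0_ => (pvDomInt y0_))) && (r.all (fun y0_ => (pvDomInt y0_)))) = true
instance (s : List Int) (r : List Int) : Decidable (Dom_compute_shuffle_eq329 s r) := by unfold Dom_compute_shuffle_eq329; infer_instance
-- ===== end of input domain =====

-- B replaces A's per-step list copy/slice recursion with one in-place iterative pass (O(n) instead of O(n^2)).

-- ===== PORT A =====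
-- literal port of A: recursion on s, copying s and slicing off the last element each step
def compute_shuffle_eq329 (s : List Int) (r : List Int) : List Int :=
  if h : s.length > 0 then
    let l := s.length
    let index := PySem.Int.mod (PySem.List.pyGetD r 0 0) (l : Int)   -- r[0] % l (r ≠ [] by Pre_)
    let head := PySem.List.pyGetD s index 0                          -- s[index]; 0 ≤ index < l always
    let s_post := PySem.List.pySetD s index (PySem.List.pyGetD s ((l : Int) - 1) 0)  -- s_post[index] = s[l-1]
    head :: compute_shuffle_eq329 (PySem.List.slice s_post none (some (-1))) (PySem.List.slice r (some 1) none)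
  else []
termination_by s.length
decreasing_by
  simp [PySem.List.slice_to_neg_one, PySem.List.length_pySetD]
  omega

-- ===== PORT B =====
-- B's for-loop over r[:len(s)] with state (arr, l); out.append becomes cons on return
def shuffleLoopB : List Int → Nat → List Int → List Int
  | _, _, [] => []
  | arr, l, rv :: rest =>
    let idx := PySem.Int.mod rv (l : Int)
    PySem.List.pyGetD arr idx 0 ::
      shuffleLoopB (PySem.List.pySetD arr idx (PySem.List.pyGetD arr ((l : Int) - 1) 0)) (l - 1) rest

def compute_shuffle_eq329_alt (s : List Int) (r : List Int) : List Int :=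
  shuffleLoopB s s.length (PySem.List.slice r none (some (s.length : Int)))

-- ===== PRECONDITION & SPEC =====
-- A indexes r[0] at every recursive step, so it raises IndexError when r has fewer elements than s.
def Pre_compute_shuffle_eq329 (s : List Int) (r : List Int) : Prop := s.length ≤ r.length
instance (s : List Int) (r : List Int) : Decidable (Pre_compute_shuffle_eq329 s r) := by unfold Pre_compute_shuffle_eq329; infer_instance
def pvWitness_compute_shuffle_eq329 : List Int × List Int := ([1, 2, 3], [5, 2, 0])

def Spec_compute_shuffle_eq329 (s : List Int) (r : List Int) (out : List Int) : Prop := out = compute_shuffle_eq329_alt s r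
instance (s : List Int) (r : List Int) (out : List Int) : Decidable (Spec_compute_shuffle_eq329 s r out) := by unfold Spec_compute_shuffle_eq329; infer_instance

-- ===== CLAIM (what is proved, stated in full; the proofs are below) =====
def Claim_equal_compute_shuffle_eq329 : Prop := ∀ (s : List Int) (r : List Int), Dom_compute_shuffle_eq329 s r → Pre_compute_shuffle_eq329 s r → Spec_compute_shuffle_eq329 s r (compute_shuffle_eq329 s r)

-- ===== LEMMAS AND PROOFS =====

-- A on the length-l prefix of arr, fed the first l of r, equals B's loop on full arr with counter l.
theorem shuffle_main (rs : List Int) : ∀ (rest arr : List Int), rs.length ≤ arr.length →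
    compute_shuffle_eq329 (arr.take rs.length) (rs ++ rest) = shuffleLoopB arr rs.length rs := by
  induction rs with
  | nil =>
    intro rest arr _
    simp [compute_shuffle_eq329, shuffleLoopB]
  | cons rv rs' ih =>
    intro rest arr hlen
    have hl : (rv :: rs').length = rs'.length + 1 := rfl
    set l : Nat := rs'.length + 1 with hldef
    have hla : l ≤ arr.length := by simpa using hlen
    have hlt : (arr.take l).length = l := by simp; omega
    have hidx0 : (0 : Int) ≤ PySem.Int.mod rv (l : Int) := PySem.Int.mod_nonneg _ (by exact_mod_cast Nat.succ_pos _)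
    have hidxl : PySem.Int.mod rv (l : Int) < (l : Int) := PySem.Int.mod_lt _ (by exact_mod_cast Nat.succ_pos _)
    set i : Nat := (PySem.Int.mod rv (l : Int)).toNat with hidef
    have hiofl : (PySem.Int.mod rv (l : Int)) = (i : Int) := by omega
    have hil : i < l := by omega
    rw [List.cons_append, compute_shuffle_eq329]
    simp only [hlt, hl, shuffleLoopB]
    rw [dif_pos (by omega)]
    simp only [PySem.List.pyGetD_zero_cons]
    rw [hiofl]
    -- head: (arr.take l)[i] = arr[i]
    have hget : ∀ (xs : List Int) (n : Nat), n < l → l ≤ xs.length →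
        PySem.List.pyGetD (xs.take l) ((n : Nat) : Int) 0 = PySem.List.pyGetD xs ((n : Nat) : Int) 0 := by
      intro xs n hn hx
      rw [PySem.List.pyGetD_eq_getElem _ _ (by omega) (by simpa [hlt] using (by simp; omega : (n:Int) < ((xs.take l).length : Int)))]
      rw [PySem.List.pyGetD_eq_getElem _ _ (by omega) (by exact_mod_cast lt_of_lt_of_le hn hx)]
      simp [List.getElem_take]
    have hlm1 : ((l : Int) - 1) = ((l - 1 : Nat) : Int) := by omega
    have hgetl1 : PySem.List.pyGetD (arr.take l) ((l : Int) - 1) 0 = PySem.List.pyGetD arr ((l : Int) - 1) 0 := by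
      rw [hlm1]; exact hget arr (l - 1) (by omega) hla
    rw [hget arr i hil hla, hgetl1]
    congr 1
    -- tail: slice (pySetD (take l arr) i v) [:-1] = take (l-1) (arr.set i v)
    set v : Int := PySem.List.pyGetD arr ((l : Int) - 1) 0 with hvdef
    have hset : PySem.List.pySetD (arr.take l) ((i : Nat) : Int) v = (arr.set i v).take l := by
      rw [PySem.List.pySetD_natCast]
      exact (List.take_set ..).symm
    rw [hset, PySem.List.slice_to_neg_one]
    have hdrop : ((arr.set i v).take l).dropLast = (arr.set i v).take (l - 1) := by
      rw [List.dropLast_eq_take, List.length_take, List.take_take]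
      congr 1
      have : l ≤ (arr.set i v).length := by simpa using hla
      omega
    rw [hdrop, PySem.List.slice_from_one]
    have htail : (rv :: (rs' ++ rest)).tail = rs' ++ rest := rfl
    rw [htail, PySem.List.pySetD_natCast]
    have : l - 1 = rs'.length := by omega
    rw [this]
    exact ih rest (arr.set i v) (by simp only [List.length_set]; omega)

-- ===== VERDICT (by name: the statement is the Claim_ definition above) =====
theorem compute_shuffle_eq329_spec : Claim_equal_compute_shuffle_eq329 := by
  intro s r _ hpre
  have hpre' : s.length ≤ r.length := hpre
  unfold Spec_compute_shuffle_eq329 compute_shuffle_eq329_alt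
  have hlen : (r.take s.length).length = s.length := by
    rw [List.length_take]; omega
  have hmain := shuffle_main (r.take s.length) (r.drop s.length) s (by rw [hlen])
  rw [hlen, List.take_append_drop, List.take_length] at hmain
  rw [PySem.List.slice_to_natCast, ← hmain]
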